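-- pv_equiv track=rewrite | github.com/SanchezHernan/Fungus-Propagation-MPI4Py | tpfinal.py | getVecinosInfectados
-- ===== SOURCE A (Python) =====
-- def getVecinosInfectados(matriz, i, j):
--     infectados = 0
--     vectorVecinos = []
--     m = len(matriz)
--     n = len(matriz[0])
--
--     #creo el vectorVecinos segun la posicion de i y j
--     if i == 0:
--         if j == 0:
--             vectorVecinos = [matriz[0][1], matriz[1][0], matriz[1][1]]
--         elif j >= n-1:
--             vectorVecinos = [matriz[0][j-1], matriz[1][j-1], matriz[1][j]]
--         else:
--             vectorVecinos = [matriz[0][j-1], matriz[0][j+1], matriz[1][j-1], matriz[1][j], matriz[1][j+1]]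
--     elif i == m-1:
--         if j == 0:
--             vectorVecinos = [matriz[i-1][0], matriz[i-1][1], matriz[i][1]]
--         elif j >= n-1:
--             vectorVecinos = [matriz[i-1][j-1], matriz[i-1][j], matriz[i][j-1]]
--         else:
--             vectorVecinos = [matriz[i-1][j-1], matriz[i-1][j], matriz[i-1][j+1], matriz[i][j-1], matriz[i][j+1]]
--     elif j == 0:
--         vectorVecinos = [matriz[i-1][j], matriz[i-1][j+1], matriz[i][j+1], matriz[i+1][j], matriz[i+1][j+1]]
--     elif j == n-1:
--         vectorVecinos = [matriz[i-1][j-1], matriz[i-1][j], matriz[i][j-1], matriz[i+1][j-1], matriz[i+1][j]]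
--     else:
--         vectorVecinos = [
--             matriz[i-1][j-1], matriz[i-1][j], matriz[i-1][j+1], matriz[i][j-1], matriz[i][j+1], matriz[i+1][j-1], matriz[i+1][j], matriz[i+1][j+1]
--         ]
--
--     #cuento los infectados entre los vecinos
--     for vecino in vectorVecinos:
--         if vecino['estado'] == 'R':
--             infectados += 1
--
--     return infectados
-- ===== SOURCE B (Python) =====
-- def getVecinosInfectados(matriz, i, j):
--     m = len(matriz)
--     n = len(matriz[0])
--     if not (0 <= i < m and 0 <= j < n):
--         raise IndexError('posicion fuera de la grilla')
--     infectados = 0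
--     for di in (-1, 0, 1):
--         for dj in (-1, 0, 1):
--             if di == 0 and dj == 0:
--                 continue
--             a, b = i + di, j + dj
--             if 0 <= a < m and 0 <= b < n and matriz[a][b]['estado'] == 'R':
--                 infectados += 1
--     return infectados
-- ===== Notes on version B (the rewrite author's own statement) =====
-- stated objective: simpler
-- what changed: Replaces A's nine-way explicit branch listing of neighbor positions (corner/edge/interior cases) by one uniform bounds-checked loop over the eight offsets of the 3x3 box, skipping (0,0), after validating that the queried position lies inside the grid.
import Mathlib
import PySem

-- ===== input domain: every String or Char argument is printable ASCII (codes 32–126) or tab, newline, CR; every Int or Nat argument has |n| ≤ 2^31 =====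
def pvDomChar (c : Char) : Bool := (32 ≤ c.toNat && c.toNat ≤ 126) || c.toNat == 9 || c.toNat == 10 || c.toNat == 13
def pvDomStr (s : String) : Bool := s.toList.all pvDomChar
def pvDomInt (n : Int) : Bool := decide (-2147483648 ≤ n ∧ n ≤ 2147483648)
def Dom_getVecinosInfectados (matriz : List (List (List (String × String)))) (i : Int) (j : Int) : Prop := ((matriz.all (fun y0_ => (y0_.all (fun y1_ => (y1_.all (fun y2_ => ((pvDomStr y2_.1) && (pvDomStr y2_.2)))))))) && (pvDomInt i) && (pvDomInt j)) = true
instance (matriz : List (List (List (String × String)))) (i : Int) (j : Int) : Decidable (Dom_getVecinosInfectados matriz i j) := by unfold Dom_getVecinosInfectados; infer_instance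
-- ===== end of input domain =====

-- B replaces A's nine-way explicit listing of neighbor positions by one uniform
-- bounds-checked loop over the eight offsets of the 3x3 box (skipping (0,0));
-- objective: simpler.

-- shared trivial helpers: matriz[a][b] and cell['estado'] (dict = assoc list, first match)
def pvCell (matriz : List (List (List (String × String)))) (a b : Int) : Option (List (String × String)) :=
  (PySem.List.pyGet? matriz a).bind (fun r => PySem.List.pyGet? r b)

def pvLookup (c : List (String × String)) : Option String :=
  (c.find? (fun p => p.1 == "estado")).map Prod.snd

-- ===== PORT A =====
def getVecinosInfectados (matriz : List (List (List (String × String)))) (i : Int) (j : Int) : Int :=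
  let m : Int := matriz.length
  match PySem.List.pyGet? matriz 0 with          -- matriz[0]; none where Python raises IndexError
  | none => 0
  | some row0 =>
    let n : Int := row0.length
    let vectorVecinos : List (Option (List (String × String))) :=
      if i = 0 then
        if j = 0 then
          [pvCell matriz 0 1, pvCell matriz 1 0, pvCell matriz 1 1]
        else if j ≥ n - 1 then
          [pvCell matriz 0 (j-1), pvCell matriz 1 (j-1), pvCell matriz 1 j]
        else
          [pvCell matriz 0 (j-1), pvCell matriz 0 (j+1), pvCell matriz 1 (j-1), pvCell matriz 1 j, pvCell matriz 1 (j+1)]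
      else if i = m - 1 then
        if j = 0 then
          [pvCell matriz (i-1) 0, pvCell matriz (i-1) 1, pvCell matriz i 1]
        else if j ≥ n - 1 then
          [pvCell matriz (i-1) (j-1), pvCell matriz (i-1) j, pvCell matriz i (j-1)]
        else
          [pvCell matriz (i-1) (j-1), pvCell matriz (i-1) j, pvCell matriz (i-1) (j+1), pvCell matriz i (j-1), pvCell matriz i (j+1)]
      else if j = 0 then
        [pvCell matriz (i-1) j, pvCell matriz (i-1) (j+1), pvCell matriz i (j+1), pvCell matriz (i+1) j, pvCell matriz (i+1) (j+1)]
      else if j = n - 1 then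
        [pvCell matriz (i-1) (j-1), pvCell matriz (i-1) j, pvCell matriz i (j-1), pvCell matriz (i+1) (j-1), pvCell matriz (i+1) j]
      else
        [pvCell matriz (i-1) (j-1), pvCell matriz (i-1) j, pvCell matriz (i-1) (j+1), pvCell matriz i (j-1), pvCell matriz i (j+1), pvCell matriz (i+1) (j-1), pvCell matriz (i+1) j, pvCell matriz (i+1) (j+1)]
    vectorVecinos.foldl (fun acc v => if v.bind pvLookup = some "R" then acc + 1 else acc) 0

-- ===== PORT B =====
-- body of B's inner loop iteration (one box offset (di,dj)); the (0,0) offset is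
-- skipped ('continue'); `none ≠ some "R"` where Python would raise
def pvStep (matriz : List (List (List (String × String)))) (m n i j di dj acc : Int) : Int :=
  if ¬(di = 0 ∧ dj = 0) ∧ 0 ≤ i+di ∧ i+di < m ∧ 0 ≤ j+dj ∧ j+dj < n ∧
     (pvCell matriz (i+di) (j+dj)).bind pvLookup = some "R"
  then acc + 1 else acc

def getVecinosInfectados_alt (matriz : List (List (List (String × String)))) (i : Int) (j : Int) : Int :=
  let m : Int := matriz.length
  match PySem.List.pyGet? matriz 0 with          -- matriz[0]; none where Python raises IndexError
  | none => 0
  | some row0 =>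
    let n : Int := row0.length
    -- B validates the queried position; Python raises IndexError off-grid (outside Pre_): 0 here
    if 0 ≤ i ∧ i < m ∧ 0 ≤ j ∧ j < n then
      ([-1, 0, 1] : List Int).foldl (fun acc di =>
        ([-1, 0, 1] : List Int).foldl (fun acc dj => pvStep matriz m n i j di dj acc) acc) 0
    else 0

-- ===== PRECONDITION & SPEC =====
-- Pre_ excludes the inputs where A raises (empty/1-row/1-column grids, out-of-range or
-- missing cells, a read neighbor cell lacking the 'estado' key) and two corners where
-- B itself raises IndexError or the neighbor set is ambiguous: negative in-range indices,
-- which A accepts only through Python's negative-index wraparound, and grids whose first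
-- row is shorter than 2 cells, where A can read past the declared grid width on ragged rows.
def Pre_getVecinosInfectados (matriz : List (List (List (String × String)))) (i : Int) (j : Int) : Prop :=
  2 ≤ matriz.length ∧ 2 ≤ (matriz.headD []).length ∧
  0 ≤ i ∧ i < matriz.length ∧ 0 ≤ j ∧ j < (matriz.headD []).length ∧
  ∀ di ∈ ([-1, 0, 1] : List Int), ∀ dj ∈ ([-1, 0, 1] : List Int),
    ¬(di = 0 ∧ dj = 0) → 0 ≤ i+di → i+di < matriz.length → 0 ≤ j+dj → j+dj < (matriz.headD []).length →
      ((pvCell matriz (i+di) (j+dj)).bind pvLookup).isSome = true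

instance (matriz : List (List (List (String × String)))) (i : Int) (j : Int) : Decidable (Pre_getVecinosInfectados matriz i j) := by unfold Pre_getVecinosInfectados; infer_instance

def pvWitness_getVecinosInfectados : (List (List (List (String × String)))) × Int × Int :=
  ([[[("estado", "R")], [("estado", "S")]], [[("estado", "R")], [("estado", "R")]]], 0, 0)

def Spec_getVecinosInfectados (matriz : List (List (List (String × String)))) (i : Int) (j : Int) (out : Int) : Prop := out = getVecinosInfectados_alt matriz i j
instance (matriz : List (List (List (String × String)))) (i : Int) (j : Int) (out : Int) : Decidable (Spec_getVecinosInfectados matriz i j out) := by unfold Spec_getVecinosInfectados; infer_instance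

-- ===== CLAIM (what is proved, stated in full; the proofs are below) =====
def Claim_equal_getVecinosInfectados : Prop := ∀ (matriz : List (List (List (String × String)))) (i : Int) (j : Int), Dom_getVecinosInfectados matriz i j → Pre_getVecinosInfectados matriz i j → Spec_getVecinosInfectados matriz i j (getVecinosInfectados matriz i j)

-- ===== LEMMAS AND PROOFS =====

-- a skipped or out-of-grid offset contributes nothing
theorem pvStep_out {matriz : List (List (List (String × String)))} {m n i j di dj : Int} (acc : Int)
    (h : ¬(¬(di = 0 ∧ dj = 0) ∧ 0 ≤ i+di ∧ i+di < m ∧ 0 ≤ j+dj ∧ j+dj < n)) :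
    pvStep matriz m n i j di dj acc = acc := by
  unfold pvStep
  rw [if_neg]
  intro ⟨h1, h2, h3, h4, h5, _⟩
  exact h ⟨h1, h2, h3, h4, h5⟩

-- a non-center in-bounds offset contributes its infection test
theorem pvStep_in {matriz : List (List (List (String × String)))} {m n i j di dj : Int} (acc : Int)
    (h : ¬(di = 0 ∧ dj = 0) ∧ 0 ≤ i+di ∧ i+di < m ∧ 0 ≤ j+dj ∧ j+dj < n) :
    pvStep matriz m n i j di dj acc =
      if (pvCell matriz (i+di) (j+dj)).bind pvLookup = some "R" then acc + 1 else acc := by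
  obtain ⟨h1, h2, h3, h4, h5⟩ := h
  unfold pvStep
  by_cases hc : (pvCell matriz (i+di) (j+dj)).bind pvLookup = some "R" <;>
    simp [h1, h2, h3, h4, h5, hc]

-- linearizer: turn an `if c then acc+1 else acc` chain into sums of 0/1 indicators
theorem ite_add_one {c : Prop} [inst : Decidable c] (acc : Int) :
    (if c then acc + 1 else acc) = acc + (if c then (1:Int) else 0) := by
  split_ifs <;> omega

-- ===== VERDICT (by name: the statement is the Claim_ definition above) =====
theorem getVecinosInfectados_spec : Claim_equal_getVecinosInfectados := by
  intro matriz i j _ hpre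
  obtain ⟨hm, hn, hi0, him, hj0, hjn, _⟩ := hpre
  unfold Spec_getVecinosInfectados
  rcases matriz with _ | ⟨r0, rest⟩
  · simp at hm
  simp only [List.headD] at hn hjn
  simp only [getVecinosInfectados, getVecinosInfectados_alt, PySem.List.pyGet?_zero_cons,
    List.foldl]
  rw [if_pos (show (0:Int) ≤ i ∧ i < ((r0 :: rest).length : Int) ∧ (0:Int) ≤ j ∧ j < (r0.length : Int) from ⟨hi0, by omega, hj0, by omega⟩)]
  by_cases hi : i = 0
  · subst hi
    rw [if_pos rfl]
    by_cases hj : j = 0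
    · subst hj
      rw [if_pos rfl]
      rw [pvStep_in _ ?_, pvStep_in _ ?_, pvStep_out _ ?_, pvStep_in _ ?_, pvStep_out _ ?_, pvStep_out _ ?_, pvStep_out _ ?_, pvStep_out _ ?_, pvStep_out _ ?_]
      simp only [List.foldl, ite_add_one, add_zero, zero_add]
      ring_nf
      all_goals omega
    · rw [if_neg hj]
      by_cases hjn1 : j = (r0.length : Int) - 1
      · rw [if_pos (le_of_eq hjn1.symm)]
        rw [pvStep_out _ ?_, pvStep_in _ ?_, pvStep_in _ ?_, pvStep_out _ ?_, pvStep_out _ ?_, pvStep_in _ ?_, pvStep_out _ ?_, pvStep_out _ ?_, pvStep_out _ ?_]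
        simp only [List.foldl, ite_add_one, add_zero, zero_add]
        ring_nf
        all_goals omega
      · rw [if_neg (by omega)]
        rw [pvStep_in _ ?_, pvStep_in _ ?_, pvStep_in _ ?_, pvStep_in _ ?_, pvStep_out _ ?_, pvStep_in _ ?_, pvStep_out _ ?_, pvStep_out _ ?_, pvStep_out _ ?_]
        simp only [List.foldl, ite_add_one, add_zero, zero_add]
        ring_nf
        all_goals omega
  · rw [if_neg hi]
    by_cases him1 : i = ((r0 :: rest).length : Int) - 1
    · rw [if_pos him1]
      by_cases hj : j = 0
      · subst hj
        rw [if_pos rfl]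
        rw [pvStep_out _ ?_, pvStep_out _ ?_, pvStep_out _ ?_, pvStep_in _ ?_, pvStep_out _ ?_, pvStep_out _ ?_, pvStep_in _ ?_, pvStep_in _ ?_, pvStep_out _ ?_]
        simp only [List.foldl, ite_add_one, add_zero, zero_add]
        ring_nf
        all_goals omega
      · rw [if_neg hj]
        by_cases hjn1 : j = (r0.length : Int) - 1
        · rw [if_pos (le_of_eq hjn1.symm)]
          rw [pvStep_out _ ?_, pvStep_out _ ?_, pvStep_out _ ?_, pvStep_out _ ?_, pvStep_out _ ?_, pvStep_in _ ?_, pvStep_out _ ?_, pvStep_in _ ?_, pvStep_in _ ?_]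
          simp only [List.foldl, ite_add_one, add_zero, zero_add]
          ring_nf
          all_goals omega
        · rw [if_neg (by omega)]
          rw [pvStep_out _ ?_, pvStep_out _ ?_, pvStep_out _ ?_, pvStep_in _ ?_, pvStep_out _ ?_, pvStep_in _ ?_, pvStep_in _ ?_, pvStep_in _ ?_, pvStep_in _ ?_]
          simp only [List.foldl, ite_add_one, add_zero, zero_add]
          ring_nf
          all_goals omega
    · rw [if_neg him1]
      by_cases hj : j = 0
      · subst hj
        rw [if_pos rfl]
        rw [pvStep_in _ ?_, pvStep_in _ ?_, pvStep_out _ ?_, pvStep_in _ ?_, pvStep_out _ ?_, pvStep_out _ ?_, pvStep_in _ ?_, pvStep_in _ ?_, pvStep_out _ ?_]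
        simp only [List.foldl, ite_add_one, add_zero, zero_add]
        ring_nf
        all_goals omega
      · rw [if_neg hj]
        by_cases hjn1 : j = (r0.length : Int) - 1
        · rw [if_pos hjn1]
          rw [pvStep_out _ ?_, pvStep_in _ ?_, pvStep_in _ ?_, pvStep_out _ ?_, pvStep_out _ ?_, pvStep_in _ ?_, pvStep_out _ ?_, pvStep_in _ ?_, pvStep_in _ ?_]
          simp only [List.foldl, ite_add_one, add_zero, zero_add]
          ring_nf
          all_goals omega
        · rw [if_neg hjn1]
          rw [pvStep_in _ ?_, pvStep_in _ ?_, pvStep_in _ ?_, pvStep_in _ ?_, pvStep_out _ ?_, pvStep_in _ ?_, pvStep_in _ ?_, pvStep_in _ ?_, pvStep_in _ ?_]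
          simp only [List.foldl, ite_add_one, add_zero, zero_add]
          ring_nf
          all_goals omega
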